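-- pv_equiv track=rewrite | github.com/Adrasteon/JustNews | scripts/fix_changelog_and_reports.py | ensure_blank_lines_around_fences
-- ===== SOURCE A (Python) =====
-- def ensure_blank_lines_around_fences(lines):
--     out = []
--     i = 0
--     while i < len(lines):
--         line = lines[i]
--         if line.strip().startswith('```'):
--             # ensure previous line is blank
--             if out and out[-1].strip() != '':
--                 out.append('')
--             out.append(line)
--             i += 1
--             # copy until closing fence
--             while i < len(lines) and not lines[i].strip().startswith('```'):
--                 out.append(lines[i])
--                 i += 1
--             if i < len(lines):
--                 out.append(lines[i])
--                 i += 1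
--             # ensure next line is blank
--             if i < len(lines) and lines[i].strip() != '':
--                 out.append('')
--         else:
--             out.append(line)
--             i += 1
--     return out
-- ===== SOURCE B (Python) =====
-- def ensure_blank_lines_around_fences(lines):
--     out = []
--     in_fence = False
--     pending = False
--     for line in lines:
--         is_fence = line.strip().startswith('```')
--         if in_fence:
--             out.append(line)
--             if is_fence:
--                 in_fence = False
--                 pending = True
--         elif is_fence:
--             if out and out[-1].strip() != '':
--                 out.append('')
--             out.append(line)
--             in_fence = True
--             pending = False
--         else:
--             if pending and line.strip() != '':
--                 out.append('')
--             out.append(line)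
--             pending = False
--     return out
-- ===== Notes on version B (the rewrite author's own statement) =====
-- stated objective: simpler
-- what changed: Replaced A's nested while-loops (inner copy-until-closing-fence loop with index look-ahead) by a single flat pass over the lines with two state flags, in_fence and pending, the pending flag deferring the after-fence blank insertion.
import Mathlib
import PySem

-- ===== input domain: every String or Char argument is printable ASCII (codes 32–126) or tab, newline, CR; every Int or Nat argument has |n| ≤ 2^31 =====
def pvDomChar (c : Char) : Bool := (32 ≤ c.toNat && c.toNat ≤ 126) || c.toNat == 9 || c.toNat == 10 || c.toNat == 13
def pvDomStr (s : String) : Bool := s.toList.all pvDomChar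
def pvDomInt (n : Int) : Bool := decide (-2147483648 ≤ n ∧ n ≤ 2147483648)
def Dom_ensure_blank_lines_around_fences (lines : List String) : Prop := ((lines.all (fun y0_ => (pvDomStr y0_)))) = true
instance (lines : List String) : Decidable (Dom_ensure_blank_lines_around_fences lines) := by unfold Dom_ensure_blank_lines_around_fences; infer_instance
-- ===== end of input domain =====

-- B replaces A's nested while-loops (inner copy-until-fence loop with look-ahead) by one
-- flat pass with two state flags (in_fence, pending blank); objective: simpler decomposition.

-- shared tiny helper: Python's `if out and out[-1].strip() != '': out.append('')`
-- (accumulators are kept reversed: cons = append, head = out[-1]; reversed at the end)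
def pvBlankPrev (acc : List String) : List String :=
  match acc with
  | [] => acc
  | h :: _ => if PySem.Str.strip h ≠ "" then "" :: acc else acc

-- `line.strip().startswith('```')`
def pvIsFence (s : String) : Bool := PySem.Str.startswith (PySem.Str.strip s) "```"

-- ===== PORT A =====
-- A-side: `if i < len(lines) and lines[i].strip() != '': out.append('')` (look-ahead after a close)
def pvBlankNext (rest acc : List String) : List String :=
  match rest with
  | [] => acc
  | n :: _ => if PySem.Str.strip n ≠ "" then "" :: acc else acc

mutual
-- outer while-loop of A
def pvGoA : List String → List String → List String
  | [], acc => acc.reverse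
  | l :: ls, acc =>
    if pvIsFence l then pvGoAIn ls (l :: pvBlankPrev acc)
    else pvGoA ls (l :: acc)
-- inner while-loop of A: copy until closing fence, append it, then the look-ahead blank
def pvGoAIn : List String → List String → List String
  | [], acc => acc.reverse
  | l :: ls, acc =>
    if pvIsFence l then pvGoA ls (pvBlankNext ls (l :: acc))
    else pvGoAIn ls (l :: acc)
end

def ensure_blank_lines_around_fences (lines : List String) : List String :=
  pvGoA lines []

-- ===== PORT B =====
-- single flat for-loop with state (in_fence, pending)
def pvGoB : List String → List String → Bool → Bool → List String
  | [], acc, _, _ => acc.reverse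
  | l :: ls, acc, inF, pend =>
    let isF := pvIsFence l
    if inF then
      if isF then pvGoB ls (l :: acc) false true
      else pvGoB ls (l :: acc) true pend
    else if isF then
      pvGoB ls (l :: pvBlankPrev acc) true false
    else
      let acc1 := if pend && decide (PySem.Str.strip l ≠ "") then "" :: acc else acc
      pvGoB ls (l :: acc1) false false

def ensure_blank_lines_around_fences_alt (lines : List String) : List String :=
  pvGoB lines [] false false

-- ===== PRECONDITION & SPEC =====
def Spec_ensure_blank_lines_around_fences (lines : List String) (out : List String) : Prop := out = ensure_blank_lines_around_fences_alt lines
instance (lines : List String) (out : List String) : Decidable (Spec_ensure_blank_lines_around_fences lines out) := by unfold Spec_ensure_blank_lines_around_fences; infer_instance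

-- ===== CLAIM (what is proved, stated in full; the proofs are below) =====
def Claim_equal_ensure_blank_lines_around_fences : Prop := ∀ (lines : List String), Dom_ensure_blank_lines_around_fences lines → Spec_ensure_blank_lines_around_fences lines (ensure_blank_lines_around_fences lines)

-- ===== LEMMAS AND PROOFS =====

theorem pvIsFence_strip_ne {s : String} (h : pvIsFence s = true) : PySem.Str.strip s ≠ "" := by
  intro hb
  unfold pvIsFence at h
  rw [hb] at h
  exact absurd h (by decide)

theorem pvStrip_empty : PySem.Str.strip "" = "" := by decide

-- the coupled invariant: (P) outside a fence with no pending blank A's outer loop equals B's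
-- flat loop; (Q) right after a closing fence (acc head nonblank) B's `pending` flag produces
-- exactly A's look-ahead blank; (R) inside a fence B copies exactly like A's inner loop.
theorem pvMain : ∀ (k : Nat) (ls : List String), ls.length ≤ k →
    (∀ acc, pvGoA ls acc = pvGoB ls acc false false) ∧
    (∀ h t, PySem.Str.strip h ≠ "" →
      pvGoA ls (pvBlankNext ls (h :: t)) = pvGoB ls (h :: t) false true) ∧
    (∀ acc p, pvGoAIn ls acc = pvGoB ls acc true p) := by
  intro k
  induction k with
  | zero =>
    intro ls hl
    have : ls = [] := List.eq_nil_of_length_eq_zero (Nat.le_zero.mp hl)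
    subst this
    refine ⟨?_, ?_, ?_⟩ <;> intros <;> simp [pvGoA, pvGoAIn, pvGoB, pvBlankNext]
  | succ k ih =>
    intro ls hl
    cases ls with
    | nil =>
      refine ⟨?_, ?_, ?_⟩ <;> intros <;> simp [pvGoA, pvGoAIn, pvGoB, pvBlankNext]
    | cons l ls =>
      have hls : ls.length ≤ k := Nat.le_of_succ_le_succ (by simpa using hl)
      obtain ⟨ihP, ihQ, ihR⟩ := ih ls hls
      refine ⟨?_, ?_, ?_⟩
      · -- P
        intro acc
        by_cases hf : pvIsFence l = true
        · simp only [pvGoA, pvGoB, hf, if_pos]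
          exact ihR (l :: pvBlankPrev acc) false
        · simp only [pvGoA, pvGoB, hf, Bool.false_eq_true, if_false, Bool.false_and]
          exact ihP (l :: acc)
      · -- Q
        intro h t hh
        by_cases hf : pvIsFence l = true
        · -- next line is itself a fence: both insert one blank
          have hl' : PySem.Str.strip l ≠ "" := pvIsFence_strip_ne hf
          have e1 : pvBlankNext (l :: ls) (h :: t) = "" :: h :: t := by
            simp [pvBlankNext, hl']
          have e2 : pvBlankPrev ("" :: h :: t) = "" :: h :: t := by
            simp [pvBlankPrev, pvStrip_empty]
          have e3 : pvBlankPrev (h :: t) = "" :: h :: t := by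
            simp [pvBlankPrev, hh]
          rw [e1]
          simp only [pvGoA, pvGoB, hf, if_true, e2, e3]
          exact ihR (l :: "" :: h :: t) false
        · by_cases hb : PySem.Str.strip l = ""
          · -- blank next line: neither inserts a blank
            have e1 : pvBlankNext (l :: ls) (h :: t) = h :: t := by
              simp [pvBlankNext, hb]
            rw [e1]
            simp only [pvGoA, pvGoB, hf, Bool.false_eq_true, if_false, hb]
            simpa using ihP (l :: h :: t)
          · -- nonblank next line: both insert one blank
            have e1 : pvBlankNext (l :: ls) (h :: t) = "" :: h :: t := by
              simp [pvBlankNext, hb]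
            rw [e1]
            simp only [pvGoA, pvGoB, hf, Bool.false_eq_true, if_false]
            rw [if_pos (by simpa using hb)]
            exact ihP (l :: "" :: h :: t)
      · -- R
        intro acc p
        by_cases hf : pvIsFence l = true
        · simp only [pvGoAIn, pvGoB, hf, if_true]
          exact (ihQ l acc (pvIsFence_strip_ne hf)).symm ▸
            ihQ l acc (pvIsFence_strip_ne hf)
        · simp only [pvGoAIn, pvGoB, hf, Bool.false_eq_true, if_false]
          exact ihR (l :: acc) p

-- ===== VERDICT (by name: the statement is the Claim_ definition above) =====
theorem ensure_blank_lines_around_fences_spec : Claim_equal_ensure_blank_lines_around_fences := by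
  intro lines _
  unfold Spec_ensure_blank_lines_around_fences ensure_blank_lines_around_fences ensure_blank_lines_around_fences_alt
  exact ((pvMain lines.length lines le_rfl).1) []
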